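-- pv_equiv track=rewrite | github.com/jwl3github/jwl-orion2 | game/Moo2_Savegame.py | to_bool_list
-- ===== SOURCE A (Python) =====
-- def to_bool_list(bytes_array):
--     """
--         returns a list of booleans from bit-values of given bytearray
--     """
--     ba = []
--     index = 1
--     for byte in bytes_array:
--         for bit in range(7):
--             if byte & 1 << bit:
--                 ba.append(index)
--             index += 1
--     return ba
-- ===== SOURCE B (Python) =====
-- def to_bool_list(bytes_array):
--     """
--         returns a list of booleans from bit-values of given bytearray
--     """
--     ba = []
--     base = 0
--     for byte in bytes_array:
--         m = byte & 0x7F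
--         while m:
--             lsb = m & -m
--             ba.append(base + lsb.bit_length())
--             m &= m - 1
--         base += 7
--     return ba
-- ===== Notes on version B (the rewrite author's own statement) =====
-- stated objective: alternative
-- what changed: Instead of testing all 7 bit positions of every byte, B masks the byte to 7 bits and scans only its set bits (lsb = m & -m, position = lsb.bit_length(), cleared with m &= m-1), keeping a per-byte base that advances by 7.
import Mathlib
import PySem

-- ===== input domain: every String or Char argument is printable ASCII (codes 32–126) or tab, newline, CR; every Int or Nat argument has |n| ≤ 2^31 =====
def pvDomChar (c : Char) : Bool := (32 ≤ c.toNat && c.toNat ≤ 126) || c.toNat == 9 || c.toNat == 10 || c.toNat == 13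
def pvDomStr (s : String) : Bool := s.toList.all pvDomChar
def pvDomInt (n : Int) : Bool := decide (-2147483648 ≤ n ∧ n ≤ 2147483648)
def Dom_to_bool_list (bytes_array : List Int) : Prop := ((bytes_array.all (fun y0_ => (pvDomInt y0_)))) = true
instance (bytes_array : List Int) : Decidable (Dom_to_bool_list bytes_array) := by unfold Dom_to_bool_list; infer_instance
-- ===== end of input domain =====

-- B replaces A's test of all 7 bit positions per byte by a bit-scan over the set bits only
-- (lsb = m & -m, position = lsb.bit_length(), clear with m &= m-1).

-- ===== PORT A =====
-- Python truthiness of `byte & 1 << bit` is ported as ≠ 0; PySem.Int.band is Python's & (exact on negatives).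
def to_bool_list (bytes_array : List Int) : List Int :=
  (bytes_array.foldl
    (fun st byte =>
      (List.range 7).foldl
        (fun st (bit : Nat) =>
          (if PySem.Int.band byte ((1 : Int) <<< bit) ≠ 0 then st.1 ++ [st.2] else st.1, st.2 + 1))
        st)
    (([] : List Int), (1 : Int))).1

-- ===== PORT B =====
-- Python's `while m:` loop. m = byte & 0x7F and m & (m-1) are ≥ 0 in Python, so m is kept as a Nat
-- (.toNat is exact there); `fuel` only guards totality: the loop runs at most popcount m ≤ m times.
def pvBitScan (fuel : Nat) (ba : List Int) (base : Int) (m : Nat) : List Int :=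
  match fuel with
  | 0 => ba
  | fuel + 1 =>
    if m = 0 then ba
    else
      pvBitScan fuel
        (ba ++ [base + (PySem.Int.bitLength (PySem.Int.band (m : Int) (-(m : Int))) : Int)])
        base
        (PySem.Int.band (m : Int) ((m : Int) - 1)).toNat

def to_bool_list_alt (bytes_array : List Int) : List Int :=
  (bytes_array.foldl
    (fun st byte =>
      let m : Nat := (PySem.Int.band byte 127).toNat
      (pvBitScan m st.1 st.2 m, st.2 + 7))
    (([] : List Int), (0 : Int))).1

-- ===== PRECONDITION & SPEC =====
def Spec_to_bool_list (bytes_array : List Int) (out : List Int) : Prop := out = to_bool_list_alt bytes_array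
instance (bytes_array : List Int) (out : List Int) : Decidable (Spec_to_bool_list bytes_array out) := by unfold Spec_to_bool_list; infer_instance

-- ===== CLAIM (what is proved, stated in full; the proofs are below) =====
def Claim_equal_to_bool_list : Prop := ∀ (bytes_array : List Int), Dom_to_bool_list bytes_array → Spec_to_bool_list bytes_array (to_bool_list bytes_array)

-- ===== LEMMAS AND PROOFS =====

-- the low 7 bits of b, as A and B both see them
def pvM (b : Int) : Nat := (PySem.Int.band b 127).toNat

-- the values the while-loop of B emits, base-independent (fueled like pvBitScan)
def pvScan (fuel m : Nat) : List Nat :=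
  match fuel with
  | 0 => []
  | fuel + 1 =>
    if m = 0 then []
    else
      PySem.Int.bitLength (PySem.Int.band (m : Int) (-(m : Int))) ::
        pvScan fuel (PySem.Int.band (m : Int) ((m : Int) - 1)).toNat

theorem pvBitScan_eq : ∀ (fuel m : Nat) (ba : List Int) (base : Int),
    pvBitScan fuel ba base m = ba ++ (pvScan fuel m).map (fun (k : Nat) => base + (k : Int)) := by
  intro fuel
  induction fuel with
  | zero => intro m ba base; simp [pvBitScan, pvScan]
  | succ fuel ih =>
    intro m ba base
    by_cases h : m = 0
    · simp [pvBitScan, pvScan, h]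
    · simp [pvBitScan, pvScan, h, ih]

theorem pvScan_small : ∀ m : Nat, m < 128 →
    pvScan m m = ((List.range 7).filter (fun k => m.testBit k)).map (fun k => k + 1) := by decide

theorem pvM_lt (b : Int) : pvM b < 128 := by
  have h1 : b.toNat &&& 127 ≤ 127 := Nat.and_le_right
  have h2 : 127 &&& (-b - 1).toNat ≤ 127 := Nat.and_le_left
  unfold pvM PySem.Int.band
  split_ifs <;> simp <;> omega

theorem pv_sub_testBit : ∀ d : Nat, d ≤ 127 → ∀ k, k < 7 → (127 - d).testBit k = !d.testBit k := by
  decide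

theorem pv_testBit_127 (k : Nat) (hk : k < 7) : Nat.testBit 127 k = true := by
  have : (127 : Nat) = 2 ^ 7 - 1 := by norm_num
  rw [this, Nat.testBit_two_pow_sub_one]
  simp [hk]

theorem pv_bridge (b : Int) (k : Nat) (hk : k < 7) :
    (PySem.Int.band b ((1 : Int) <<< k) ≠ 0) ↔ (pvM b).testBit k = true := by
  have hpow : (1 : Int) <<< k = ((2 ^ k : Nat) : Int) := by
    rw [Int.shiftLeft_eq]; push_cast; ring
  rw [hpow]
  unfold pvM
  by_cases hb : 0 ≤ b
  · -- b ≥ 0 : both sides talk about b.toNat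
    have h1 : PySem.Int.band b ((2 ^ k : Nat) : Int) = ((b.toNat &&& 2 ^ k : Nat) : Int) := by
      conv_lhs => rw [show b = ((b.toNat : Nat) : Int) by omega]
      rw [PySem.Int.band_natCast]
    have h2 : PySem.Int.band b (127 : Int) = ((b.toNat &&& 127 : Nat) : Int) := by
      conv_lhs => rw [show b = ((b.toNat : Nat) : Int) by omega,
        show (127 : Int) = ((127 : Nat) : Int) by norm_num]
      rw [PySem.Int.band_natCast]
    rw [h1, h2]
    simp only [Int.toNat_natCast, Nat.testBit_land, pv_testBit_127 k hk, Bool.and_true]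
    rw [Nat.and_two_pow]
    rcases hbit : b.toNat.testBit k <;> simp
  · -- b < 0 : both bands land in the second branch of PySem.Int.band
    have hneg : ¬ (0 ≤ b) := hb
    set c : Nat := (-b - 1).toNat with hc
    have h1 : PySem.Int.band b ((2 ^ k : Nat) : Int) = ((2 ^ k - (2 ^ k &&& c) : Nat) : Int) := by
      unfold PySem.Int.band
      rw [if_neg hneg, if_pos (by positivity)]
      simp only [Int.toNat_natCast, hc]
    have h2 : PySem.Int.band b (127 : Int) = ((127 - (127 &&& c) : Nat) : Int) := by
      unfold PySem.Int.band
      rw [if_neg hneg, if_pos (by norm_num)]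
      rw [show (127 : Int) = ((127 : Nat) : Int) from rfl]
      simp only [Int.toNat_natCast, hc]
    rw [h1, h2]
    simp only [Int.toNat_natCast]
    rw [pv_sub_testBit (127 &&& c) Nat.and_le_left k hk]
    simp only [Nat.testBit_land, pv_testBit_127 k hk, Bool.true_and]
    have hand : 2 ^ k &&& c = (c.testBit k).toNat * 2 ^ k := by
      rw [Nat.land_comm, Nat.and_two_pow]
    rw [hand]
    rcases hbit : c.testBit k <;> simp

-- A's inner loop over range n: appends idx + k for each set position k, and advances idx by n
theorem pv_innerA (b : Int) : ∀ (n : Nat) (ba : List Int) (idx : Int),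
    (List.range n).foldl
        (fun st (bit : Nat) =>
          (if PySem.Int.band b ((1 : Int) <<< bit) ≠ 0 then st.1 ++ [st.2] else st.1, st.2 + 1))
        (ba, idx)
      = (ba ++ (((List.range n).filter
            (fun (k : Nat) => decide (PySem.Int.band b ((1 : Int) <<< k) ≠ 0))).map
            (fun (k : Nat) => idx + (k : Int))), idx + n) := by
  intro n
  induction n with
  | zero => intro ba idx; simp
  | succ n ih =>
    intro ba idx
    rw [List.range_succ, List.foldl_append, ih]
    by_cases h : PySem.Int.band b ((1 : Int) <<< n) = 0 <;>
      simp [h, List.filter_append, Prod.mk.injEq] <;> ring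

theorem pv_main : ∀ (l : List Int) (ba : List Int) (base : Int),
    (l.foldl
        (fun st byte =>
          (List.range 7).foldl
            (fun st (bit : Nat) =>
              (if PySem.Int.band byte ((1 : Int) <<< bit) ≠ 0 then st.1 ++ [st.2] else st.1,
                st.2 + 1))
            st)
        (ba, base + 1))
      = (((l.foldl
            (fun st byte =>
              let m : Nat := (PySem.Int.band byte 127).toNat
              (pvBitScan m st.1 st.2 m, st.2 + 7))
            (ba, base)).1,
          (l.foldl
            (fun st byte =>
              let m : Nat := (PySem.Int.band byte 127).toNat
              (pvBitScan m st.1 st.2 m, st.2 + 7))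
            (ba, base)).2 + 1)) := by
  intro l
  induction l with
  | nil => intro ba base; simp
  | cons b t ih =>
    intro ba base
    have hA := pv_innerA b 7 ba (base + 1)
    have hfilter :
        ((List.range 7).filter (fun (k : Nat) => decide (PySem.Int.band b ((1 : Int) <<< k) ≠ 0)))
          = ((List.range 7).filter (fun (k : Nat) => (pvM b).testBit k)) := by
      apply List.filter_congr
      intro x hx
      have hx7 : x < 7 := List.mem_range.mp hx
      have := pv_bridge b x hx7
      rcases hbit : (pvM b).testBit x
      · simp [hbit] at this ⊢; simpa using this
      · simp [hbit] at this ⊢; exact this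
    have hB : pvBitScan (pvM b) ba base (pvM b)
        = ba ++ (((List.range 7).filter (fun (k : Nat) => (pvM b).testBit k)).map
            (fun (k : Nat) => base + ((k + 1 : Nat) : Int))) := by
      rw [pvBitScan_eq, pvScan_small (pvM b) (pvM_lt b), List.map_map]
      rfl
    have hsame :
        (((List.range 7).filter (fun (k : Nat) => (pvM b).testBit k)).map
            (fun (k : Nat) => base + 1 + (k : Int)))
          = (((List.range 7).filter (fun (k : Nat) => (pvM b).testBit k)).map
              (fun (k : Nat) => base + ((k + 1 : Nat) : Int))) := by
      apply List.map_congr_left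
      intro x _
      push_cast; ring
    simp only [List.foldl_cons]
    rw [hA, hfilter, hsame]
    have hstep :
        ((fun st byte =>
            let m : Nat := (PySem.Int.band byte 127).toNat
            (pvBitScan m st.1 st.2 m, st.2 + 7)) (ba, base) b)
          = (pvBitScan (pvM b) ba base (pvM b), base + 7) := rfl
    rw [show (base + 1 + (7 : Nat) : Int) = (base + 7) + 1 by push_cast; ring]
    rw [← hB]
    exact ih (pvBitScan (pvM b) ba base (pvM b)) (base + 7)

-- ===== VERDICT (by name: the statement is the Claim_ definition above) =====
theorem to_bool_list_spec : Claim_equal_to_bool_list := by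
  intro bytes_array _
  unfold Spec_to_bool_list to_bool_list to_bool_list_alt
  have h := pv_main bytes_array [] 0
  simp only [zero_add] at h
  rw [h]
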